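-- pv_equiv track=rewrite | github.com/BrendanHart/ner-in-wsj-nlp | ner.py | fixQuotes
-- ===== SOURCE A (Python) =====
-- def fixQuotes(text):
--     seenSingle = False
--     seenDouble = False
--
--     i = 0
--     while i  < len(text):
--         if text[i] == "\'":
--             text[i] = "'"
--             if seenSingle:
--                 if text[i-1] == " " and i-1 >= 0:
--                     text.pop(i-1)
--                     i-=1
--                 seenSingle = False
--             else:
--                 if i+1 < len(text):
--                     if text[i+1] == " ":
--                         text.pop(i+1)
--                 seenSingle = True
--         elif text[i] == '\"':
--             text[i] = '"'
--             if seenDouble: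
--                 if text[i-1] == " " and i-1 >= 0:
--                     text.pop(i-1)
--                     i-=1
--                 seenDouble = False
--             else:
--                 if i+1 < len(text):
--                     if text[i+1] == " ":
--                         text.pop(i+1)
--                 seenDouble = True
--
--         i+=1
--
--     return text
-- ===== SOURCE B (Python) =====
-- def fixQuotes(text):
--     seenSingle = False
--     seenDouble = False
--     remove = set()
--     for i, tok in enumerate(text):
--         if tok == "'":
--             if seenSingle:
--                 if i >= 1 and text[i - 1] == " ":
--                     remove.add(i - 1)
--             else:
--                 if i + 1 < len(text) and text[i + 1] == " ":
--                     remove.add(i + 1)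
--             seenSingle = not seenSingle
--         elif tok == '"':
--             if seenDouble:
--                 if i >= 1 and text[i - 1] == " ":
--                     remove.add(i - 1)
--             else:
--                 if i + 1 < len(text) and text[i + 1] == " ":
--                     remove.add(i + 1)
--             seenDouble = not seenDouble
--     text[:] = [tok for j, tok in enumerate(text) if j not in remove]
--     return text
-- ===== Notes on version B (the rewrite author's own statement) =====
-- stated objective: alternative
-- what changed: A walks the list with a while-loop that mutates as it goes (popping spaces and re-adjusting the index); B first does a read-only flag-toggling pass that collects the original indices of the spaces to delete in a set (the quote-space-quote case collapses to one mark), then rebuilds the list in a single filter pass assigned back with text[:] so the object is still mutated in place.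
import Mathlib
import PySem

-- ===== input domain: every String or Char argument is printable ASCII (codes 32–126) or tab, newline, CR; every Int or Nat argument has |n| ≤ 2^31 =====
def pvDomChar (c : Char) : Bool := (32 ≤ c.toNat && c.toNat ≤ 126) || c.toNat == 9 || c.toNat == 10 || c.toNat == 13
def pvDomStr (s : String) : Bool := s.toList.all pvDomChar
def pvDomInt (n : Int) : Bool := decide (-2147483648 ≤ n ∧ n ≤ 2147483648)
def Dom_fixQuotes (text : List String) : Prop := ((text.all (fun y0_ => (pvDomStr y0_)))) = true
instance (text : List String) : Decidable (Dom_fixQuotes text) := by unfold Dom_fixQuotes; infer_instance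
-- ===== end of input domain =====

-- B replaces A's in-place index-juggling while-loop by a read-only marking pass that collects the
-- indices of spaces to delete in a set, then one filter pass (alternative decomposition, same cost).
-- Both Pythons mutate `text` in place identically; the theorems are about the return value.


-- ===== PORT A =====
-- A's while-loop over the mutating list: state = (current list, index i, seenSingle, seenDouble).
-- `text[i] = "'"` (resp. `text[i] = '"'`) is ported as List.set (Python "\'" and "'" are the same string).
-- Python's pop condition `text[i-1] == " " and i-1 >= 0` is ported as `1 ≤ i ∧ t[i-1]? = some " "`:
-- for i = 0 Python reads text[-1] by wraparound but its `i-1 >= 0` conjunct then fails, so no pop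
-- happens, exactly as the Lean conjunction says (for 1 ≤ i the index i-1 is in range, so `t[i-1]?`
-- is Python's `text[i-1]`).  `text.pop(j)` is List.eraseIdx; after `text.pop(i-1)` Python does
-- `i -= 1` and then `i += 1` at the loop end, so that recursive call keeps i.
def fixQuotesLoop (text : List String) (i : Nat) (sS sD : Bool) : List String :=
  if h : i < text.length then
    if text[i] = "'" then
      let t := text.set i "'"
      if sS then
        if hp : 1 ≤ i ∧ t[i-1]? = some " " then
          fixQuotesLoop (t.eraseIdx (i-1)) i false sD
        else fixQuotesLoop t (i+1) false sD
      else
        if hn : t[i+1]? = some " " then   -- `i+1 < len(text) and text[i+1] == " "`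
          fixQuotesLoop (t.eraseIdx (i+1)) (i+1) true sD
        else fixQuotesLoop t (i+1) true sD
    else if text[i] = "\"" then
      let t := text.set i "\""
      if sD then
        if hp : 1 ≤ i ∧ t[i-1]? = some " " then
          fixQuotesLoop (t.eraseIdx (i-1)) i sS false
        else fixQuotesLoop t (i+1) sS false
      else
        if hn : t[i+1]? = some " " then
          fixQuotesLoop (t.eraseIdx (i+1)) (i+1) sS true
        else fixQuotesLoop t (i+1) sS true
    else fixQuotesLoop text (i+1) sS sD
  else text
termination_by text.length - i
decreasing_by
  all_goals ((try simp only [List.length_eraseIdx, List.length_set]) <;> (try split) <;> omega)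

def fixQuotes (text : List String) : List String :=
  fixQuotesLoop text 0 false false

-- ===== PORT B =====
-- B's first pass: fold over enumerate(text) keeping the two flags and the removal set of original
-- indices (enumerate yields Int indices, so the set holds Int).
-- `i >= 1 and text[i-1] == " "` is `1 ≤ i ∧ text[(i-1).toNat]? = some " "`;
-- `i + 1 < len(text) and text[i+1] == " "` is `(i+1) < text.length ∧ text[(i+1).toNat]? = some " "`
-- (both indices are nonnegative there, so `[·]?` is Python's in-range indexing).
def markLoop (text : List String) : List (Int × String) → Bool → Bool → PySem.Set Int → PySem.Set Int
  | [], _, _, rem => rem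
  | (i, tok) :: rest, sS, sD, rem =>
    if tok = "'" then
      if sS then
        markLoop text rest false sD
          (if 1 ≤ i ∧ text[(i-1).toNat]? = some " " then PySem.Set.add rem (i-1) else rem)
      else
        markLoop text rest true sD
          (if (i+1) < (text.length : Int) ∧ text[(i+1).toNat]? = some " " then PySem.Set.add rem (i+1) else rem)
    else if tok = "\"" then
      if sD then
        markLoop text rest sS false
          (if 1 ≤ i ∧ text[(i-1).toNat]? = some " " then PySem.Set.add rem (i-1) else rem)
      else
        markLoop text rest sS true
          (if (i+1) < (text.length : Int) ∧ text[(i+1).toNat]? = some " " then PySem.Set.add rem (i+1) else rem)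
    else markLoop text rest sS sD rem

def fixQuotes_alt (text : List String) : List String :=
  let rem := markLoop text (PySem.List.enumerate text 0) false false PySem.Set.empty
  ((PySem.List.enumerate text 0).filter (fun p => !(PySem.Set.contains rem p.1))).map Prod.snd

-- ===== PRECONDITION & SPEC =====
def Spec_fixQuotes (text : List String) (out : List String) : Prop := out = fixQuotes_alt text
instance (text : List String) (out : List String) : Decidable (Spec_fixQuotes text out) := by unfold Spec_fixQuotes; infer_instance

-- ===== CLAIM (what is proved, stated in full; the proofs are below) =====
def Claim_equal_fixQuotes : Prop := ∀ (text : List String), Dom_fixQuotes text → Spec_fixQuotes text (fixQuotes text)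

-- ===== LEMMAS AND PROOFS =====

-- Common functional core both ports compute: a left-to-right pass with an output accumulator;
-- a closing quote drops a trailing space from the accumulator, an opening quote eats a following space.
def specRun : List String → List String → Bool → Bool → List String
  | acc, [], _, _ => acc
  | acc, tok :: rest, sS, sD =>
    if tok = "'" then
      if sS then
        specRun ((if acc.getLast? = some " " then acc.dropLast else acc) ++ ["'"]) rest false sD
      else
        if rest.head? = some " " then specRun (acc ++ ["'"]) rest.tail true sD
        else specRun (acc ++ ["'"]) rest true sD
    else if tok = "\"" then
      if sD then
        specRun ((if acc.getLast? = some " " then acc.dropLast else acc) ++ ["\""]) rest sS false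
      else
        if rest.head? = some " " then specRun (acc ++ ["\""]) rest.tail sS true
        else specRun (acc ++ ["\""]) rest sS true
    else specRun (acc ++ [tok]) rest sS sD
termination_by _ u => u.length
decreasing_by all_goals (simp [List.length_tail]; try omega)

-- filter-out-marked-indices-then-project, the second pass of B
def del (S : PySem.Set Int) (l : List (Int × String)) : List String :=
  (l.filter (fun p => !(PySem.Set.contains S p.1))).map Prod.snd

lemma getElem?_append_len {α : Type} (l r : List α) (x : α) :
    (l ++ x :: r)[l.length]? = some x := by
  simp

lemma getElem_append_len {α : Type} (l r : List α) (x : α)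
    (h : l.length < (l ++ x :: r).length) : (l ++ x :: r)[l.length]'h = x := by
  have h2 := getElem?_append_len l r x
  rw [List.getElem?_eq_getElem h] at h2
  exact Option.some.inj h2

lemma getElem?_append_len_succ {α : Type} (l r : List α) (x : α) :
    (l ++ x :: r)[l.length + 1]? = r[0]? := by
  rw [List.getElem?_append_right (by omega)]
  simp

lemma set_append_len {α : Type} (l r : List α) (x y : α) :
    (l ++ x :: r).set l.length y = l ++ y :: r := by
  simp

lemma eraseIdx_append_len {α : Type} (l r : List α) (x : α) :
    (l ++ x :: r).eraseIdx l.length = l ++ r := by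
  induction l with
  | nil => simp
  | cons a l ih => simp [ih]

lemma cond_prev (acc r : List String) (x : String) :
    (1 ≤ acc.length ∧ (acc ++ x :: r)[acc.length - 1]? = some " ") ↔ acc.getLast? = some " " := by
  constructor
  · rintro ⟨h1, h2⟩
    rw [List.getElem?_append_left (by omega)] at h2
    rwa [List.getLast?_eq_getElem?]
  · intro h
    have hne : acc ≠ [] := by rintro rfl; simp at h
    have h1 : 1 ≤ acc.length := by
      cases acc with | nil => exact absurd rfl hne | cons a l => simp
    refine ⟨h1, ?_⟩
    rw [List.getElem?_append_left (by omega)]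
    rwa [List.getLast?_eq_getElem?] at h

-- ===== A-side: the while-loop equals specRun =====
lemma loop_eq_specRun : ∀ (n : Nat) (u acc : List String) (sS sD : Bool), u.length ≤ n →
    fixQuotesLoop (acc ++ u) acc.length sS sD = specRun acc u sS sD := by
  intro n
  induction n with
  | zero =>
    intro u acc sS sD hn
    have hu : u = [] := List.eq_nil_of_length_eq_zero (Nat.le_zero.mp hn)
    subst hu
    rw [fixQuotesLoop, specRun]
    simp
  | succ n ih =>
    intro u acc sS sD hn
    match u with
    | [] => rw [fixQuotesLoop, specRun]; simp
    | tok :: uq =>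
      have hlt : acc.length < (acc ++ tok :: uq).length := by simp
      rw [fixQuotesLoop, specRun]
      rw [dif_pos hlt]
      simp only [getElem_append_len, set_append_len]
      by_cases h1 : tok = "'"
      · subst h1
        rw [if_pos rfl, if_pos rfl]
        cases sS with
        | true =>
          simp only [if_true]
          by_cases hlast : acc.getLast? = some " "
          · rw [dif_pos ((cond_prev acc uq "'").mpr hlast), if_pos hlast]
            have hacc : acc.dropLast ++ [" "] = acc := List.dropLast_append_getLast? " " hlast
            have hlen : acc.length - 1 = acc.dropLast.length := by
              rw [List.length_dropLast]
            have hsplit : acc ++ "'" :: uq = acc.dropLast ++ " " :: "'" :: uq := by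
              conv_lhs => rw [← hacc]
              simp
            have herase : (acc ++ "'" :: uq).eraseIdx (acc.length - 1)
                = (acc.dropLast ++ ["'"]) ++ uq := by
              rw [hsplit, hlen, eraseIdx_append_len acc.dropLast ("'" :: uq) " "]
              simp
            rw [herase]
            have hne : acc ≠ [] := by rintro rfl; simp at hlast
            have hlen2 : acc.length = (acc.dropLast ++ ["'"]).length := by
              simp only [List.length_append, List.length_dropLast, List.length_cons,
                List.length_nil]
              cases acc with | nil => exact absurd rfl hne | cons a l => simp
            rw [hlen2]
            exact ih uq (acc.dropLast ++ ["'"]) false sD (by simpa using Nat.le_of_succ_le_succ hn)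
          · rw [dif_neg (fun hc => hlast ((cond_prev acc uq "'").mp hc)), if_neg hlast]
            have hx : acc ++ "'" :: uq = (acc ++ ["'"]) ++ uq := by simp
            have hl : acc.length + 1 = (acc ++ ["'"]).length := by simp
            rw [hx, hl]
            exact ih uq (acc ++ ["'"]) false sD (by simpa using Nat.le_of_succ_le_succ hn)
        | false =>
          simp only [Bool.false_eq_true, if_false]
          rw [getElem?_append_len_succ]
          by_cases hnext : uq[0]? = some " "
          · rw [dif_pos hnext]
            cases uq with
            | nil => simp at hnext
            | cons a uqq =>
              have ha : a = " " := by simpa using hnext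
              subst ha
              have herase : (acc ++ "'" :: " " :: uqq).eraseIdx (acc.length + 1)
                  = (acc ++ ["'"]) ++ uqq := by
                have hx : acc ++ "'" :: " " :: uqq = (acc ++ ["'"]) ++ " " :: uqq := by simp
                have hl : acc.length + 1 = (acc ++ ["'"]).length := by simp
                rw [hx, hl, eraseIdx_append_len]
              rw [herase]
              have hl : acc.length + 1 = (acc ++ ["'"]).length := by simp
              rw [hl]
              have hh : (" " :: uqq).head? = some " " := rfl
              rw [if_pos hh]
              exact ih uqq (acc ++ ["'"]) true sD (by simp at hn ⊢; omega)
          · rw [dif_neg hnext]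
            have hh : ¬ uq.head? = some " " := by
              cases uq with
              | nil => simp
              | cons a l => simpa using hnext
            rw [if_neg hh]
            have hx : acc ++ "'" :: uq = (acc ++ ["'"]) ++ uq := by simp
            have hl : acc.length + 1 = (acc ++ ["'"]).length := by simp
            rw [hx, hl]
            exact ih uq (acc ++ ["'"]) true sD (by simpa using Nat.le_of_succ_le_succ hn)
      · rw [if_neg h1, if_neg h1]
        by_cases h2 : tok = "\""
        · subst h2
          rw [if_pos rfl, if_pos rfl]
          cases sD with
          | true =>
            simp only [if_true]
            by_cases hlast : acc.getLast? = some " "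
            · rw [dif_pos ((cond_prev acc uq "\"").mpr hlast), if_pos hlast]
              have hacc : acc.dropLast ++ [" "] = acc := List.dropLast_append_getLast? " " hlast
              have hlen : acc.length - 1 = acc.dropLast.length := by
                rw [List.length_dropLast]
              have hsplit : acc ++ "\"" :: uq = acc.dropLast ++ " " :: "\"" :: uq := by
                conv_lhs => rw [← hacc]
                simp
              have herase : (acc ++ "\"" :: uq).eraseIdx (acc.length - 1)
                  = (acc.dropLast ++ ["\""]) ++ uq := by
                rw [hsplit, hlen, eraseIdx_append_len acc.dropLast ("\"" :: uq) " "]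
                simp
              rw [herase]
              have hne : acc ≠ [] := by rintro rfl; simp at hlast
              have hlen2 : acc.length = (acc.dropLast ++ ["\""]).length := by
                simp only [List.length_append, List.length_dropLast, List.length_cons,
                  List.length_nil]
                cases acc with | nil => exact absurd rfl hne | cons a l => simp
              rw [hlen2]
              exact ih uq (acc.dropLast ++ ["\""]) sS false (by simpa using Nat.le_of_succ_le_succ hn)
            · rw [dif_neg (fun hc => hlast ((cond_prev acc uq "\"").mp hc)), if_neg hlast]
              have hx : acc ++ "\"" :: uq = (acc ++ ["\""]) ++ uq := by simp
              have hl : acc.length + 1 = (acc ++ ["\""]).length := by simp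
              rw [hx, hl]
              exact ih uq (acc ++ ["\""]) sS false (by simpa using Nat.le_of_succ_le_succ hn)
          | false =>
            simp only [Bool.false_eq_true, if_false]
            rw [getElem?_append_len_succ]
            by_cases hnext : uq[0]? = some " "
            · rw [dif_pos hnext]
              cases uq with
              | nil => simp at hnext
              | cons a uqq =>
                have ha : a = " " := by simpa using hnext
                subst ha
                have herase : (acc ++ "\"" :: " " :: uqq).eraseIdx (acc.length + 1)
                    = (acc ++ ["\""]) ++ uqq := by
                  have hx : acc ++ "\"" :: " " :: uqq = (acc ++ ["\""]) ++ " " :: uqq := by simp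
                  have hl : acc.length + 1 = (acc ++ ["\""]).length := by simp
                  rw [hx, hl, eraseIdx_append_len]
                rw [herase]
                have hl : acc.length + 1 = (acc ++ ["\""]).length := by simp
                rw [hl]
                have hh : (" " :: uqq).head? = some " " := rfl
                rw [if_pos hh]
                exact ih uqq (acc ++ ["\""]) sS true (by simp at hn ⊢; omega)
            · rw [dif_neg hnext]
              have hh : ¬ uq.head? = some " " := by
                cases uq with
                | nil => simp
                | cons a l => simpa using hnext
              rw [if_neg hh]
              have hx : acc ++ "\"" :: uq = (acc ++ ["\""]) ++ uq := by simp
              have hl : acc.length + 1 = (acc ++ ["\""]).length := by simp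
              rw [hx, hl]
              exact ih uq (acc ++ ["\""]) sS true (by simpa using Nat.le_of_succ_le_succ hn)
        · rw [if_neg h2, if_neg h2]
          have hx : acc ++ tok :: uq = (acc ++ [tok]) ++ uq := by simp
          have hl : acc.length + 1 = (acc ++ [tok]).length := by simp
          rw [hx, hl]
          exact ih uq (acc ++ [tok]) sS sD (by simpa using Nat.le_of_succ_le_succ hn)

-- ===== B-side helper facts =====
lemma del_append (S : PySem.Set Int) (l l' : List (Int × String)) :
    del S (l ++ l') = del S l ++ del S l' := by
  simp [del]

lemma mem_take_enum (text : List String) (k : Nat) (p : Int × String)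
    (hp : p ∈ (PySem.List.enumerate text 0).take k) :
    ∃ m : Nat, m < k ∧ ∃ hm : m < text.length, p = ((m : Int), text[m]) := by
  rw [List.mem_take_iff_getElem] at hp
  obtain ⟨i, hi, he⟩ := hp
  have hlen : (PySem.List.enumerate text 0).length = text.length := by
    simp [PySem.List.length_enumerate]
  have hi2 : i < text.length := by omega
  refine ⟨i, by omega, hi2, ?_⟩
  rw [← he, PySem.List.getElem_enumerate]
  simp

lemma del_add_high (S : PySem.Set Int) (l : List (Int × String)) (j : Int)
    (hj : ∀ p ∈ l, p.1 ≠ j) : del (PySem.Set.add S j) l = del S l := by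
  unfold del
  rw [List.filter_congr ?_]
  intro p hp
  apply congrArg
  apply Bool.coe_iff_coe.mp
  rw [PySem.Set.contains_iff, PySem.Set.contains_iff, PySem.Set.mem_add]
  have := hj p hp
  tauto

lemma del_take_succ (S : PySem.Set Int) (text : List String) (k : Nat) (hk : k < text.length) :
    del S ((PySem.List.enumerate text 0).take (k+1)) =
      del S ((PySem.List.enumerate text 0).take k) ++
        (if PySem.Set.contains S (k : Int) then [] else [text[k]]) := by
  have hlen : (PySem.List.enumerate text 0).length = text.length := by
    simp [PySem.List.length_enumerate]
  rw [List.take_add_one, del_append]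
  congr 1
  have hg : (PySem.List.enumerate text 0)[k]? = some (((k : Int)), text[k]) := by
    rw [List.getElem?_eq_getElem (by omega)]
    rw [PySem.List.getElem_enumerate]
    simp
  rw [hg]
  simp only [Option.toList_some]
  unfold del
  by_cases hc : (k : Int) ∈ S
  · simp [hc]
  · simp [hc]

-- ===== B-side: markLoop + filter equals specRun =====
lemma del_take_succ_notin (S : PySem.Set Int) (text : List String) (k : Nat)
    (hk : k < text.length) (hnot : ((k : Int)) ∉ S) :
    del S ((PySem.List.enumerate text 0).take (k+1))
      = del S ((PySem.List.enumerate text 0).take k) ++ [text[k]] := by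
  rw [del_take_succ S text k hk]
  simp [hnot]

lemma del_take_succ_in (S : PySem.Set Int) (text : List String) (k : Nat)
    (hk : k < text.length) (hin : ((k : Int)) ∈ S) :
    del S ((PySem.List.enumerate text 0).take (k+1))
      = del S ((PySem.List.enumerate text 0).take k) := by
  rw [del_take_succ S text k hk]
  simp [hin]

lemma del_take_pred_in (S : PySem.Set Int) (text : List String) (k : Nat) (hk1 : 1 ≤ k)
    (hkl : k - 1 < text.length) (hin : (((k-1 : Nat)) : Int) ∈ S) :
    del S ((PySem.List.enumerate text 0).take k)
      = del S ((PySem.List.enumerate text 0).take (k-1)) := by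
  have e := del_take_succ_in S text (k-1) hkl hin
  rwa [Nat.sub_add_cancel hk1] at e

lemma del_take_pred_notin (S : PySem.Set Int) (text : List String) (k : Nat) (hk1 : 1 ≤ k)
    (hkl : k - 1 < text.length) (hnot : (((k-1 : Nat)) : Int) ∉ S) :
    del S ((PySem.List.enumerate text 0).take k)
      = del S ((PySem.List.enumerate text 0).take (k-1)) ++ [text[k-1]] := by
  have e := del_take_succ_notin S text (k-1) hkl hnot
  rwa [Nat.sub_add_cancel hk1] at e

lemma del_add_take (S : PySem.Set Int) (text : List String) (k : Nat) (j : Int)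
    (hj : ∀ m : Nat, m < k → ((m : Int)) ≠ j) :
    del (PySem.Set.add S j) ((PySem.List.enumerate text 0).take k)
      = del S ((PySem.List.enumerate text 0).take k) := by
  apply del_add_high
  intro p hp
  obtain ⟨m, hmk, hml, rfl⟩ := mem_take_enum text k p hp
  exact hj m hmk

lemma mark_eq_specRun : ∀ (n : Nat) (u : List String), u.length ≤ n →
    ∀ (text : List String) (k : Nat) (sS sD : Bool) (S : PySem.Set Int),
    text.drop k = u →
    (∀ j ∈ S, ∃ m : Nat, j = (m : Int) ∧ m < k ∧ text[m]? = some " ") →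
    (∀ m : Nat, m + 1 = k → ((m : Int)) ∈ S →
       ∃ m' : Nat, m' + 1 = m ∧ ((m' : Int)) ∉ S ∧
         (text[m']? = some "'" ∨ text[m']? = some "\"")) →
    specRun (del S ((PySem.List.enumerate text 0).take k)) u sS sD
      = del (markLoop text (PySem.List.enumerate u (k : Int)) sS sD S) (PySem.List.enumerate text 0) := by
  intro n
  induction n with
  | zero =>
    intro u hn text k sS sD S hdrop hsp hd
    have hu : u = [] := List.eq_nil_of_length_eq_zero (Nat.le_zero.mp hn)
    subst hu
    have hk : text.length ≤ k := by
      by_contra hlt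
      push_neg at hlt
      have h2 := List.drop_eq_getElem_cons hlt
      rw [hdrop] at h2
      exact absurd h2.symm (List.cons_ne_nil _ _)
    rw [PySem.List.enumerate_nil, markLoop, specRun,
      List.take_of_length_le (by simp [PySem.List.length_enumerate]; omega)]
  | succ n ih =>
    intro u hn text k sS sD S hdrop hsp hd
    match u with
    | [] =>
      have hk : text.length ≤ k := by
        by_contra hlt
        push_neg at hlt
        have h2 := List.drop_eq_getElem_cons hlt
        rw [hdrop] at h2
        exact absurd h2.symm (List.cons_ne_nil _ _)
      rw [PySem.List.enumerate_nil, markLoop, specRun,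
        List.take_of_length_le (by simp [PySem.List.length_enumerate]; omega)]
    | tok :: u' =>
      have hk : k < text.length := by
        by_contra h
        push_neg at h
        rw [List.drop_eq_nil_of_le h] at hdrop
        exact absurd hdrop.symm (List.cons_ne_nil _ _)
      have hcons := List.drop_eq_getElem_cons hk
      rw [hdrop] at hcons
      have htok : text[k] = tok := by
        injection hcons with h _
        exact h.symm
      have hu' : text.drop (k+1) = u' := by
        injection hcons with _ h
        exact h.symm
      have hkS : ((k : Int)) ∉ S := by
        intro hin
        obtain ⟨m, hm, hmk, _⟩ := hsp _ hin
        have h9 : k = m := by exact_mod_cast hm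
        omega
      have hlen' : u'.length ≤ n := by
        simp at hn
        omega
      rw [PySem.List.enumerate_cons, specRun]
      simp only [markLoop]
      by_cases h1 : tok = "'"
      · subst h1
        rw [if_pos rfl, if_pos rfl]
        have hcast1 : (((k : Int)) - 1).toNat = k - 1 := by omega
        have hcast2 : (((k : Int)) + 1).toNat = k + 1 := by omega
        have hcast3 : ((k : Int)) + 1 = (((k+1 : Nat)) : Int) := by push_cast; ring
        cases sS with
        | true =>
          simp only [if_true]
          by_cases hc : 1 ≤ k ∧ text[k-1]? = some " "
          · obtain ⟨hk1, hsp1⟩ := hc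
            have hkm1 : k - 1 < text.length := by omega
            have hCnd : 1 ≤ ((k : Int)) ∧ text[(((k : Int)) - 1).toNat]? = some " " := by
              rw [hcast1]; exact ⟨by exact_mod_cast hk1, hsp1⟩
            rw [if_pos hCnd]
            by_cases hmem : (((k-1 : Nat)) : Int) ∈ S
            · -- the space was already marked by the opening quote just before it
              have hadd : PySem.Set.add S (((k : Int)) - 1) = S := by
                have h8 : ((k : Int)) - 1 = (((k-1 : Nat)) : Int) := by omega
                rw [h8]; exact PySem.Set.add_of_mem hmem
              rw [hadd]
              obtain ⟨m', hm'1, hm'S, hm'q⟩ := hd (k-1) (by omega) hmem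
              have hm'len : m' < text.length := by
                rcases hm'q with hq | hq
                · exact (List.getElem?_eq_some_iff.mp hq).1
                · exact (List.getElem?_eq_some_iff.mp hq).1
              have hkk : k = (m' + 1) + 1 := by omega
              have hacc : del S ((PySem.List.enumerate text 0).take k)
                  = del S ((PySem.List.enumerate text 0).take m') ++ [text[m']] := by
                rw [hkk, del_take_succ_in S text (m'+1) (by omega)
                      (by have h9 : m' + 1 = k - 1 := by omega
                          rw [h9]; exact hmem),
                    del_take_succ_notin S text m' hm'len hm'S]
              have hlastq : (del S ((PySem.List.enumerate text 0).take k)).getLast? ≠ some " " := by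
                rw [hacc, List.getLast?_concat]
                have h7 : text[m']'hm'len ≠ " " := by
                  rcases hm'q with hq | hq <;>
                    · rw [List.getElem?_eq_getElem hm'len] at hq
                      rw [Option.some.injEq] at hq
                      rw [hq]; decide
                simp [h7]
              rw [if_neg hlastq]
              have hstep : del S ((PySem.List.enumerate text 0).take k) ++ ["'"]
                  = del S ((PySem.List.enumerate text 0).take (k+1)) := by
                rw [del_take_succ_notin S text k hk hkS, htok]
              rw [hstep, hcast3]
              apply ih u' hlen' text (k+1) false sD S hu'
              · intro j hj
                obtain ⟨m, hm, hmk, hsp2⟩ := hsp j hj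
                exact ⟨m, hm, by omega, hsp2⟩
              · intro m hm hmem2
                exfalso
                have hmk : m = k := by omega
                rw [hmk] at hmem2
                exact hkS hmem2
            · -- fresh mark: drop the trailing space from the accumulator
              have hacc : del S ((PySem.List.enumerate text 0).take k)
                  = del S ((PySem.List.enumerate text 0).take (k-1)) ++ [text[k-1]] :=
                del_take_pred_notin S text k hk1 hkm1 hmem
              have hlast : (del S ((PySem.List.enumerate text 0).take k)).getLast? = some " " := by
                rw [hacc, List.getLast?_concat]
                rw [List.getElem?_eq_getElem hkm1] at hsp1
                rw [Option.some.injEq] at hsp1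
                rw [hsp1]
              rw [if_pos hlast]
              have hdrop2 : (del S ((PySem.List.enumerate text 0).take k)).dropLast
                  = del S ((PySem.List.enumerate text 0).take (k-1)) := by
                rw [hacc, List.dropLast_concat]
              have hj1 : ((k : Int)) - 1 = (((k-1 : Nat)) : Int) := by omega
              have hnadd : ((k : Int)) ∉ PySem.Set.add S (((k-1 : Nat)) : Int) := by
                rw [PySem.Set.mem_add]
                rintro (h | h)
                · exact hkS h
                · have h9 : k = k - 1 := by exact_mod_cast h
                  omega
              have hS' : del (PySem.Set.add S (((k-1 : Nat)) : Int)) ((PySem.List.enumerate text 0).take (k+1))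
                  = del S ((PySem.List.enumerate text 0).take (k-1)) ++ ["'"] := by
                rw [del_take_succ_notin _ text k hk hnadd, htok,
                    del_take_pred_in _ text k hk1 hkm1 (by rw [PySem.Set.mem_add]; right; rfl),
                    del_add_take S text (k-1) _ (fun m hm => by
                      intro hcontr
                      have h9 : m = k - 1 := by exact_mod_cast hcontr
                      omega)]
              rw [hdrop2, ← hS', hcast3, hj1]
              apply ih u' hlen' text (k+1) false sD (PySem.Set.add S (((k-1 : Nat)) : Int)) hu'
              · intro j hj
                rw [PySem.Set.mem_add] at hj
                rcases hj with hj | hj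
                · obtain ⟨m, hm, hmk, hsp2⟩ := hsp j hj
                  exact ⟨m, hm, by omega, hsp2⟩
                · exact ⟨k-1, hj, by omega, hsp1⟩
              · intro m hm hmem2
                exfalso
                have hmk : m = k := by omega
                rw [hmk, PySem.Set.mem_add] at hmem2
                rcases hmem2 with h | h
                · exact hkS h
                · have h9 : k = k - 1 := by exact_mod_cast h
                  omega
          · have hCnd : ¬ (1 ≤ ((k : Int)) ∧ text[(((k : Int)) - 1).toNat]? = some " ") := by
              rw [hcast1]
              intro hx
              exact hc ⟨by exact_mod_cast hx.1, hx.2⟩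
            rw [if_neg hCnd]
            have hlast : (del S ((PySem.List.enumerate text 0).take k)).getLast? ≠ some " " := by
              rcases Nat.eq_zero_or_pos k with hk0 | hk0
              · subst hk0; simp [del]
              · have hkm1 : k - 1 < text.length := by omega
                have hnsp : ¬ text[k-1]? = some " " := fun h => hc ⟨hk0, h⟩
                have hmem : (((k-1 : Nat)) : Int) ∉ S := by
                  intro hin
                  obtain ⟨m, hm, hmk, hsp2⟩ := hsp _ hin
                  have h9 : k - 1 = m := by exact_mod_cast hm
                  rw [← h9] at hsp2
                  exact hnsp hsp2
                rw [del_take_pred_notin S text k hk0 hkm1 hmem, List.getLast?_concat]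
                intro hcontr
                rw [Option.some.injEq] at hcontr
                exact hnsp (by rw [List.getElem?_eq_getElem hkm1, hcontr])
            rw [if_neg hlast]
            have hstep : del S ((PySem.List.enumerate text 0).take k) ++ ["'"]
                = del S ((PySem.List.enumerate text 0).take (k+1)) := by
              rw [del_take_succ_notin S text k hk hkS, htok]
            rw [hstep, hcast3]
            apply ih u' hlen' text (k+1) false sD S hu'
            · intro j hj
              obtain ⟨m, hm, hmk, hsp2⟩ := hsp j hj
              exact ⟨m, hm, by omega, hsp2⟩
            · intro m hm hmem2
              exfalso
              have hmk : m = k := by omega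
              rw [hmk] at hmem2
              exact hkS hmem2
        | false =>
          simp only [Bool.false_eq_true, if_false]
          have hhead : u'.head? = text[k+1]? := by rw [← hu', List.head?_drop]
          by_cases hnx : text[k+1]? = some " "
          · have hk1 : k + 1 < text.length := (List.getElem?_eq_some_iff.mp hnx).1
            have hCnd : ((k : Int)) + 1 < (text.length : Int) ∧ text[(((k : Int)) + 1).toNat]? = some " " := by
              rw [hcast2]; exact ⟨by exact_mod_cast hk1, hnx⟩
            rw [if_pos hCnd, if_pos (by rw [hhead]; exact hnx)]
            have hu2 := List.drop_eq_getElem_cons hk1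
            rw [hu'] at hu2
            have hsp1 : text[k+1]'hk1 = " " := by
              rw [List.getElem?_eq_getElem hk1] at hnx
              exact Option.some.inj hnx
            -- peel the skipped space entry off markLoop (it is not a quote, so a no-op)
            have htail : u'.tail = text.drop (k+2) := by rw [hu2]; rfl
            have hpeel : markLoop text (PySem.List.enumerate u' (((k : Int)) + 1)) true sD
                  (PySem.Set.add S (((k : Int)) + 1))
                = markLoop text (PySem.List.enumerate (text.drop (k+2)) (((k+2 : Nat)) : Int)) true sD
                  (PySem.Set.add S (((k : Int)) + 1)) := by
              rw [hu2, hsp1, PySem.List.enumerate_cons, markLoop]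
              rw [if_neg (show ¬(" " = "'") from by decide),
                  if_neg (show ¬(" " = "\"") from by decide)]
              rw [show ((k : Int)) + 1 + 1 = (((k+2 : Nat)) : Int) from by push_cast; ring,
                  show k + 1 + 1 = k + 2 from by omega]
            rw [hpeel]
            have hnadd : ((k : Int)) ∉ PySem.Set.add S (((k+1 : Nat)) : Int) := by
              rw [PySem.Set.mem_add]
              rintro (h | h)
              · exact hkS h
              · have h9 : k = k + 1 := by exact_mod_cast h
                omega
            have hS' : del (PySem.Set.add S (((k+1 : Nat)) : Int)) ((PySem.List.enumerate text 0).take (k+2))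
                = del S ((PySem.List.enumerate text 0).take k) ++ ["'"] := by
              rw [show k + 2 = (k+1)+1 from rfl,
                  del_take_succ_in _ text (k+1) hk1 (by rw [PySem.Set.mem_add]; right; rfl),
                  del_take_succ_notin _ text k hk hnadd,
                  del_add_take S text k _ (fun m hm => by
                      intro hcontr
                      have h9 : m = k + 1 := by exact_mod_cast hcontr
                      omega), htok]
            have hj2 : ((k : Int)) + 1 = (((k+1 : Nat)) : Int) := by push_cast; ring
            rw [htail, ← hS', hj2]
            apply ih (text.drop (k+2)) (by
                have h9 : u'.length = text.length - (k+1) := by rw [← hu']; simp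
                simp at hn ⊢
                omega) text (k+2) true sD (PySem.Set.add S (((k+1 : Nat)) : Int)) rfl
            · intro j hj
              rw [PySem.Set.mem_add] at hj
              rcases hj with hj | hj
              · obtain ⟨m, hm, hmk, hsp2⟩ := hsp j hj
                exact ⟨m, hm, by omega, hsp2⟩
              · exact ⟨k+1, hj, by omega, hnx⟩
            · intro m hm hmem2
              have hmk : m = k + 1 := by omega
              subst hmk
              refine ⟨k, by omega, ?_, ?_⟩
              · rw [PySem.Set.mem_add]
                rintro (h | h)
                · exact hkS h
                · have h9 : k = k + 1 := by exact_mod_cast h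
                  omega
              · left
                rw [List.getElem?_eq_getElem hk, htok]
          · have hCnd : ¬ (((k : Int)) + 1 < (text.length : Int) ∧ text[(((k : Int)) + 1).toNat]? = some " ") := by
              rw [hcast2]
              intro hx
              exact hnx hx.2
            rw [if_neg hCnd, if_neg (by rw [hhead]; exact hnx)]
            have hstep : del S ((PySem.List.enumerate text 0).take k) ++ ["'"]
                = del S ((PySem.List.enumerate text 0).take (k+1)) := by
              rw [del_take_succ_notin S text k hk hkS, htok]
            rw [hstep, hcast3]
            apply ih u' hlen' text (k+1) true sD S hu'
            · intro j hj
              obtain ⟨m, hm, hmk, hsp2⟩ := hsp j hj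
              exact ⟨m, hm, by omega, hsp2⟩
            · intro m hm hmem2
              exfalso
              have hmk : m = k := by omega
              rw [hmk] at hmem2
              exact hkS hmem2

      · rw [if_neg h1, if_neg h1]
        by_cases h2 : tok = "\""
        · subst h2
          rw [if_pos rfl, if_pos rfl]
          have hcast1 : (((k : Int)) - 1).toNat = k - 1 := by omega
          have hcast2 : (((k : Int)) + 1).toNat = k + 1 := by omega
          have hcast3 : ((k : Int)) + 1 = (((k+1 : Nat)) : Int) := by push_cast; ring
          cases sD with
          | true =>
            simp only [if_true]
            by_cases hc : 1 ≤ k ∧ text[k-1]? = some " "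
            · obtain ⟨hk1, hsp1⟩ := hc
              have hkm1 : k - 1 < text.length := by omega
              have hCnd : 1 ≤ ((k : Int)) ∧ text[(((k : Int)) - 1).toNat]? = some " " := by
                rw [hcast1]; exact ⟨by exact_mod_cast hk1, hsp1⟩
              rw [if_pos hCnd]
              by_cases hmem : (((k-1 : Nat)) : Int) ∈ S
              · -- the space was already marked by the opening quote just before it
                have hadd : PySem.Set.add S (((k : Int)) - 1) = S := by
                  have h8 : ((k : Int)) - 1 = (((k-1 : Nat)) : Int) := by omega
                  rw [h8]; exact PySem.Set.add_of_mem hmem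
                rw [hadd]
                obtain ⟨m', hm'1, hm'S, hm'q⟩ := hd (k-1) (by omega) hmem
                have hm'len : m' < text.length := by
                  rcases hm'q with hq | hq
                  · exact (List.getElem?_eq_some_iff.mp hq).1
                  · exact (List.getElem?_eq_some_iff.mp hq).1
                have hkk : k = (m' + 1) + 1 := by omega
                have hacc : del S ((PySem.List.enumerate text 0).take k)
                    = del S ((PySem.List.enumerate text 0).take m') ++ [text[m']] := by
                  rw [hkk, del_take_succ_in S text (m'+1) (by omega)
                        (by have h9 : m' + 1 = k - 1 := by omega
                            rw [h9]; exact hmem),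
                      del_take_succ_notin S text m' hm'len hm'S]
                have hlastq : (del S ((PySem.List.enumerate text 0).take k)).getLast? ≠ some " " := by
                  rw [hacc, List.getLast?_concat]
                  have h7 : text[m']'hm'len ≠ " " := by
                    rcases hm'q with hq | hq <;>
                      · rw [List.getElem?_eq_getElem hm'len] at hq
                        rw [Option.some.injEq] at hq
                        rw [hq]; decide
                  simp [h7]
                rw [if_neg hlastq]
                have hstep : del S ((PySem.List.enumerate text 0).take k) ++ ["\""]
                    = del S ((PySem.List.enumerate text 0).take (k+1)) := by
                  rw [del_take_succ_notin S text k hk hkS, htok]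
                rw [hstep, hcast3]
                apply ih u' hlen' text (k+1) sS false S hu'
                · intro j hj
                  obtain ⟨m, hm, hmk, hsp2⟩ := hsp j hj
                  exact ⟨m, hm, by omega, hsp2⟩
                · intro m hm hmem2
                  exfalso
                  have hmk : m = k := by omega
                  rw [hmk] at hmem2
                  exact hkS hmem2
              · -- fresh mark: drop the trailing space from the accumulator
                have hacc : del S ((PySem.List.enumerate text 0).take k)
                    = del S ((PySem.List.enumerate text 0).take (k-1)) ++ [text[k-1]] :=
                  del_take_pred_notin S text k hk1 hkm1 hmem
                have hlast : (del S ((PySem.List.enumerate text 0).take k)).getLast? = some " " := by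
                  rw [hacc, List.getLast?_concat]
                  rw [List.getElem?_eq_getElem hkm1] at hsp1
                  rw [Option.some.injEq] at hsp1
                  rw [hsp1]
                rw [if_pos hlast]
                have hdrop2 : (del S ((PySem.List.enumerate text 0).take k)).dropLast
                    = del S ((PySem.List.enumerate text 0).take (k-1)) := by
                  rw [hacc, List.dropLast_concat]
                have hj1 : ((k : Int)) - 1 = (((k-1 : Nat)) : Int) := by omega
                have hnadd : ((k : Int)) ∉ PySem.Set.add S (((k-1 : Nat)) : Int) := by
                  rw [PySem.Set.mem_add]
                  rintro (h | h)
                  · exact hkS h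
                  · have h9 : k = k - 1 := by exact_mod_cast h
                    omega
                have hS' : del (PySem.Set.add S (((k-1 : Nat)) : Int)) ((PySem.List.enumerate text 0).take (k+1))
                    = del S ((PySem.List.enumerate text 0).take (k-1)) ++ ["\""] := by
                  rw [del_take_succ_notin _ text k hk hnadd, htok,
                      del_take_pred_in _ text k hk1 hkm1 (by rw [PySem.Set.mem_add]; right; rfl),
                      del_add_take S text (k-1) _ (fun m hm => by
                        intro hcontr
                        have h9 : m = k - 1 := by exact_mod_cast hcontr
                        omega)]
                rw [hdrop2, ← hS', hcast3, hj1]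
                apply ih u' hlen' text (k+1) sS false (PySem.Set.add S (((k-1 : Nat)) : Int)) hu'
                · intro j hj
                  rw [PySem.Set.mem_add] at hj
                  rcases hj with hj | hj
                  · obtain ⟨m, hm, hmk, hsp2⟩ := hsp j hj
                    exact ⟨m, hm, by omega, hsp2⟩
                  · exact ⟨k-1, hj, by omega, hsp1⟩
                · intro m hm hmem2
                  exfalso
                  have hmk : m = k := by omega
                  rw [hmk, PySem.Set.mem_add] at hmem2
                  rcases hmem2 with h | h
                  · exact hkS h
                  · have h9 : k = k - 1 := by exact_mod_cast h
                    omega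
            · have hCnd : ¬ (1 ≤ ((k : Int)) ∧ text[(((k : Int)) - 1).toNat]? = some " ") := by
                rw [hcast1]
                intro hx
                exact hc ⟨by exact_mod_cast hx.1, hx.2⟩
              rw [if_neg hCnd]
              have hlast : (del S ((PySem.List.enumerate text 0).take k)).getLast? ≠ some " " := by
                rcases Nat.eq_zero_or_pos k with hk0 | hk0
                · subst hk0; simp [del]
                · have hkm1 : k - 1 < text.length := by omega
                  have hnsp : ¬ text[k-1]? = some " " := fun h => hc ⟨hk0, h⟩
                  have hmem : (((k-1 : Nat)) : Int) ∉ S := by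
                    intro hin
                    obtain ⟨m, hm, hmk, hsp2⟩ := hsp _ hin
                    have h9 : k - 1 = m := by exact_mod_cast hm
                    rw [← h9] at hsp2
                    exact hnsp hsp2
                  rw [del_take_pred_notin S text k hk0 hkm1 hmem, List.getLast?_concat]
                  intro hcontr
                  rw [Option.some.injEq] at hcontr
                  exact hnsp (by rw [List.getElem?_eq_getElem hkm1, hcontr])
              rw [if_neg hlast]
              have hstep : del S ((PySem.List.enumerate text 0).take k) ++ ["\""]
                  = del S ((PySem.List.enumerate text 0).take (k+1)) := by
                rw [del_take_succ_notin S text k hk hkS, htok]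
              rw [hstep, hcast3]
              apply ih u' hlen' text (k+1) sS false S hu'
              · intro j hj
                obtain ⟨m, hm, hmk, hsp2⟩ := hsp j hj
                exact ⟨m, hm, by omega, hsp2⟩
              · intro m hm hmem2
                exfalso
                have hmk : m = k := by omega
                rw [hmk] at hmem2
                exact hkS hmem2
          | false =>
            simp only [Bool.false_eq_true, if_false]
            have hhead : u'.head? = text[k+1]? := by rw [← hu', List.head?_drop]
            by_cases hnx : text[k+1]? = some " "
            · have hk1 : k + 1 < text.length := (List.getElem?_eq_some_iff.mp hnx).1
              have hCnd : ((k : Int)) + 1 < (text.length : Int) ∧ text[(((k : Int)) + 1).toNat]? = some " " := by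
                rw [hcast2]; exact ⟨by exact_mod_cast hk1, hnx⟩
              rw [if_pos hCnd, if_pos (by rw [hhead]; exact hnx)]
              have hu2 := List.drop_eq_getElem_cons hk1
              rw [hu'] at hu2
              have hsp1 : text[k+1]'hk1 = " " := by
                rw [List.getElem?_eq_getElem hk1] at hnx
                exact Option.some.inj hnx
              -- peel the skipped space entry off markLoop (it is not a quote, so a no-op)
              have htail : u'.tail = text.drop (k+2) := by rw [hu2]; rfl
              have hpeel : markLoop text (PySem.List.enumerate u' (((k : Int)) + 1)) sS true
                    (PySem.Set.add S (((k : Int)) + 1))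
                  = markLoop text (PySem.List.enumerate (text.drop (k+2)) (((k+2 : Nat)) : Int)) sS true
                    (PySem.Set.add S (((k : Int)) + 1)) := by
                rw [hu2, hsp1, PySem.List.enumerate_cons, markLoop]
                rw [if_neg (show ¬(" " = "'") from by decide),
                    if_neg (show ¬(" " = "\"") from by decide)]
                rw [show ((k : Int)) + 1 + 1 = (((k+2 : Nat)) : Int) from by push_cast; ring,
                    show k + 1 + 1 = k + 2 from by omega]
              rw [hpeel]
              have hnadd : ((k : Int)) ∉ PySem.Set.add S (((k+1 : Nat)) : Int) := by
                rw [PySem.Set.mem_add]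
                rintro (h | h)
                · exact hkS h
                · have h9 : k = k + 1 := by exact_mod_cast h
                  omega
              have hS' : del (PySem.Set.add S (((k+1 : Nat)) : Int)) ((PySem.List.enumerate text 0).take (k+2))
                  = del S ((PySem.List.enumerate text 0).take k) ++ ["\""] := by
                rw [show k + 2 = (k+1)+1 from rfl,
                    del_take_succ_in _ text (k+1) hk1 (by rw [PySem.Set.mem_add]; right; rfl),
                    del_take_succ_notin _ text k hk hnadd,
                    del_add_take S text k _ (fun m hm => by
                        intro hcontr
                        have h9 : m = k + 1 := by exact_mod_cast hcontr
                        omega), htok]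
              have hj2 : ((k : Int)) + 1 = (((k+1 : Nat)) : Int) := by push_cast; ring
              rw [htail, ← hS', hj2]
              apply ih (text.drop (k+2)) (by
                  have h9 : u'.length = text.length - (k+1) := by rw [← hu']; simp
                  simp at hn ⊢
                  omega) text (k+2) sS true (PySem.Set.add S (((k+1 : Nat)) : Int)) rfl
              · intro j hj
                rw [PySem.Set.mem_add] at hj
                rcases hj with hj | hj
                · obtain ⟨m, hm, hmk, hsp2⟩ := hsp j hj
                  exact ⟨m, hm, by omega, hsp2⟩
                · exact ⟨k+1, hj, by omega, hnx⟩
              · intro m hm hmem2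
                have hmk : m = k + 1 := by omega
                subst hmk
                refine ⟨k, by omega, ?_, ?_⟩
                · rw [PySem.Set.mem_add]
                  rintro (h | h)
                  · exact hkS h
                  · have h9 : k = k + 1 := by exact_mod_cast h
                    omega
                · right
                  rw [List.getElem?_eq_getElem hk, htok]
            · have hCnd : ¬ (((k : Int)) + 1 < (text.length : Int) ∧ text[(((k : Int)) + 1).toNat]? = some " ") := by
                rw [hcast2]
                intro hx
                exact hnx hx.2
              rw [if_neg hCnd, if_neg (by rw [hhead]; exact hnx)]
              have hstep : del S ((PySem.List.enumerate text 0).take k) ++ ["\""]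
                  = del S ((PySem.List.enumerate text 0).take (k+1)) := by
                rw [del_take_succ_notin S text k hk hkS, htok]
              rw [hstep, hcast3]
              apply ih u' hlen' text (k+1) sS true S hu'
              · intro j hj
                obtain ⟨m, hm, hmk, hsp2⟩ := hsp j hj
                exact ⟨m, hm, by omega, hsp2⟩
              · intro m hm hmem2
                exfalso
                have hmk : m = k := by omega
                rw [hmk] at hmem2
                exact hkS hmem2

        · rw [if_neg h2, if_neg h2]
          have hstep : del S ((PySem.List.enumerate text 0).take k) ++ [tok]
              = del S ((PySem.List.enumerate text 0).take (k+1)) := by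
            rw [del_take_succ_notin S text k hk hkS, htok]
          have hcast3 : ((k : Int)) + 1 = (((k+1 : Nat)) : Int) := by push_cast; ring
          rw [hstep, hcast3]
          apply ih u' hlen' text (k+1) sS sD S hu'
          · intro j hj
            obtain ⟨m, hm, hmk, hsp2⟩ := hsp j hj
            exact ⟨m, hm, by omega, hsp2⟩
          · intro m hm hmem2
            exfalso
            have hmk : m = k := by omega
            rw [hmk] at hmem2
            exact hkS hmem2

-- ===== VERDICT (by name: the statement is the Claim_ definition above) =====
theorem fixQuotes_spec : Claim_equal_fixQuotes := by
  intro text _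
  show fixQuotes text = fixQuotes_alt text
  have hA : fixQuotes text = specRun [] text false false := by
    have h := loop_eq_specRun text.length text [] false false le_rfl
    simpa [fixQuotes] using h
  have hB : specRun [] text false false = fixQuotes_alt text := by
    have h := mark_eq_specRun text.length text le_rfl text 0 false false PySem.Set.empty
      (by simp) (by simp [PySem.Set.empty]) (by omega)
    simpa [fixQuotes_alt, del] using h
  rw [hA, hB]
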